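-- pv_equiv track=rewrite | github.com/analogdevicesinc/pyadi-dt | adidt/devices/converters/ad9081.py | ad9081_converter_select
-- ===== SOURCE A (Python) =====
-- def ad9081_converter_select(direction: str, m: int, link_mode: int) -> str:
--     """Return the ``adi,converter-select`` phandle list for AD9081."""
--     side = "rx" if direction == "rx" else "tx"
--     if direction == "rx" and link_mode == 18 and m == 4:
--         return (
--             f"<&ad9081_{side}_fddc_chan0 0>, <&ad9081_{side}_fddc_chan0 1>, "
--             f"<&ad9081_{side}_fddc_chan1 0>, <&ad9081_{side}_fddc_chan1 1>"
--         )
--     if direction == "rx" and link_mode == 26 and m == 8: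
--         return (
--             f"<&ad9081_{side}_fddc_chan0 FDDC_I>, <&ad9081_{side}_fddc_chan0 FDDC_Q>, "
--             f"<&ad9081_{side}_fddc_chan1 FDDC_I>, <&ad9081_{side}_fddc_chan1 FDDC_Q>, "
--             f"<&ad9081_{side}_fddc_chan4 FDDC_I>, <&ad9081_{side}_fddc_chan4 FDDC_Q>, "
--             f"<&ad9081_{side}_fddc_chan5 FDDC_I>, <&ad9081_{side}_fddc_chan5 FDDC_Q>"
--         )
--     if direction == "tx" and link_mode == 17 and m == 4:
--         return (
--             f"<&ad9081_{side}_fddc_chan0 0>, <&ad9081_{side}_fddc_chan0 1>, "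
--             f"<&ad9081_{side}_fddc_chan1 0>, <&ad9081_{side}_fddc_chan1 1>"
--         )
--     if m >= 8:
--         return (
--             f"<&ad9081_{side}_fddc_chan0 0>, <&ad9081_{side}_fddc_chan0 1>, "
--             f"<&ad9081_{side}_fddc_chan1 0>, <&ad9081_{side}_fddc_chan1 1>, "
--             f"<&ad9081_{side}_fddc_chan2 0>, <&ad9081_{side}_fddc_chan2 1>, "
--             f"<&ad9081_{side}_fddc_chan3 0>, <&ad9081_{side}_fddc_chan3 1>"
--         )
--     return ", ".join(
--         f"<&ad9081_{side}_fddc_chan{i} 0>" for i in range(max(1, min(m, 8)))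
--     )
-- ===== SOURCE B (Python) =====
-- # Table-driven: special cases live in a dict from (direction, link_mode, m)
-- # to explicit (channel, port) pair lists; one shared formatter/join at the end.
--
-- _SPECIAL = {
--     ("rx", 18, 4): [(0, "0"), (0, "1"), (1, "0"), (1, "1")],
--     ("rx", 26, 8): [(c, p) for c in (0, 1, 4, 5) for p in ("FDDC_I", "FDDC_Q")],
--     ("tx", 17, 4): [(0, "0"), (0, "1"), (1, "0"), (1, "1")],
-- }
--
--
-- def ad9081_converter_select(direction: str, m: int, link_mode: int) -> str:
--     side = "rx" if direction == "rx" else "tx"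
--     key = (direction, link_mode, m)
--     if key in _SPECIAL:
--         pairs = _SPECIAL[key]
--     elif m >= 8:
--         pairs = [(c, p) for c in range(4) for p in ("0", "1")]
--     else:
--         pairs = [(i, "0") for i in range(max(1, min(m, 8)))]
--     return ", ".join(f"<&ad9081_{side}_fddc_chan{c} {p}>" for c, p in pairs)
-- ===== Notes on version B (the rewrite author's own statement) =====
-- stated objective: simpler
-- what changed: Replaces the literal if-chain of hand-written phandle strings with a table of (channel, port) pairs keyed by (direction, link_mode, m), so every branch goes through one shared formatter and join.
import Mathlib
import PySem

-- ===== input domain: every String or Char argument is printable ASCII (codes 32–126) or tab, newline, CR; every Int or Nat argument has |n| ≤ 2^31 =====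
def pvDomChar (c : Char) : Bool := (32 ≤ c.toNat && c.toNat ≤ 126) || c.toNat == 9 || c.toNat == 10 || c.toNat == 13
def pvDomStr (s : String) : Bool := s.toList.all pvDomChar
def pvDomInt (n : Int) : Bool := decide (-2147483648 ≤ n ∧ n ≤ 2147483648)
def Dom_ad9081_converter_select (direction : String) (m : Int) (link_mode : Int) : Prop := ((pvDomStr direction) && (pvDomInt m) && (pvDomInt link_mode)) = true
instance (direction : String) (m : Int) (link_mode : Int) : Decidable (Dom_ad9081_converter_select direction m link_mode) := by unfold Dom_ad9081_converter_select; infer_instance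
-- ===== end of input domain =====

-- B replaces A's literal if-chain of hand-written phandle strings by a table of
-- (channel, port) pairs keyed by (direction, link_mode, m) plus one shared
-- formatter/join (objective: simpler).

set_option maxHeartbeats 1000000
set_option maxRecDepth 100000


-- ===== PORT A =====
def ad9081_converter_select (direction : String) (m : Int) (link_mode : Int) : String :=
  let side := if direction = "rx" then "rx" else "tx"
  if direction = "rx" ∧ link_mode = 18 ∧ m = 4 then
    "<&ad9081_" ++ side ++ "_fddc_chan0 0>, <&ad9081_" ++ side ++ "_fddc_chan0 1>, " ++
    "<&ad9081_" ++ side ++ "_fddc_chan1 0>, <&ad9081_" ++ side ++ "_fddc_chan1 1>"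
  else if direction = "rx" ∧ link_mode = 26 ∧ m = 8 then
    "<&ad9081_" ++ side ++ "_fddc_chan0 FDDC_I>, <&ad9081_" ++ side ++ "_fddc_chan0 FDDC_Q>, " ++
    "<&ad9081_" ++ side ++ "_fddc_chan1 FDDC_I>, <&ad9081_" ++ side ++ "_fddc_chan1 FDDC_Q>, " ++
    "<&ad9081_" ++ side ++ "_fddc_chan4 FDDC_I>, <&ad9081_" ++ side ++ "_fddc_chan4 FDDC_Q>, " ++
    "<&ad9081_" ++ side ++ "_fddc_chan5 FDDC_I>, <&ad9081_" ++ side ++ "_fddc_chan5 FDDC_Q>"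
  else if direction = "tx" ∧ link_mode = 17 ∧ m = 4 then
    "<&ad9081_" ++ side ++ "_fddc_chan0 0>, <&ad9081_" ++ side ++ "_fddc_chan0 1>, " ++
    "<&ad9081_" ++ side ++ "_fddc_chan1 0>, <&ad9081_" ++ side ++ "_fddc_chan1 1>"
  else if m ≥ 8 then
    "<&ad9081_" ++ side ++ "_fddc_chan0 0>, <&ad9081_" ++ side ++ "_fddc_chan0 1>, " ++
    "<&ad9081_" ++ side ++ "_fddc_chan1 0>, <&ad9081_" ++ side ++ "_fddc_chan1 1>, " ++
    "<&ad9081_" ++ side ++ "_fddc_chan2 0>, <&ad9081_" ++ side ++ "_fddc_chan2 1>, " ++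
    "<&ad9081_" ++ side ++ "_fddc_chan3 0>, <&ad9081_" ++ side ++ "_fddc_chan3 1>"
  else
    PySem.Str.join ", " ((PySem.List.pyRange 0 (max 1 (min m 8)) 1).map
      (fun i => "<&ad9081_" ++ side ++ "_fddc_chan" ++ PySem.Int.toStr i ++ " 0>"))

-- ===== PORT B =====
def pvSpecialTable : PySem.Dict (String × Int × Int) (List (Int × String)) :=
  PySem.Dict.mk [
    (("rx", 18, 4), [(0, "0"), (0, "1"), (1, "0"), (1, "1")]),
    (("rx", 26, 8), ([0, 1, 4, 5] : List Int).flatMap (fun c => ["FDDC_I", "FDDC_Q"].map (fun p => (c, p)))),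
    (("tx", 17, 4), [(0, "0"), (0, "1"), (1, "0"), (1, "1")])]

def pvFmtPair (side : String) (cp : Int × String) : String :=
  "<&ad9081_" ++ side ++ "_fddc_chan" ++ PySem.Int.toStr cp.1 ++ " " ++ cp.2 ++ ">"

def ad9081_converter_select_alt (direction : String) (m : Int) (link_mode : Int) : String :=
  let side := if direction = "rx" then "rx" else "tx"
  let pairs :=
    match PySem.Dict.get? pvSpecialTable (direction, link_mode, m) with
    | some ps => ps
    | none =>
      if m ≥ 8 then (PySem.List.pyRange 0 4 1).flatMap (fun c => ["0", "1"].map (fun p => (c, p)))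
      else (PySem.List.pyRange 0 (max 1 (min m 8)) 1).map (fun i => (i, "0"))
  PySem.Str.join ", " (pairs.map (pvFmtPair side))

-- ===== PRECONDITION & SPEC =====
def Spec_ad9081_converter_select (direction : String) (m : Int) (link_mode : Int) (out : String) : Prop := out = ad9081_converter_select_alt direction m link_mode
instance (direction : String) (m : Int) (link_mode : Int) (out : String) : Decidable (Spec_ad9081_converter_select direction m link_mode out) := by unfold Spec_ad9081_converter_select; infer_instance

-- ===== CLAIM (what is proved, stated in full; the proofs are below) =====
def Claim_equal_ad9081_converter_select : Prop := ∀ (direction : String) (m : Int) (link_mode : Int), Dom_ad9081_converter_select direction m link_mode → Spec_ad9081_converter_select direction m link_mode (ad9081_converter_select direction m link_mode)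

-- ===== LEMMAS AND PROOFS =====
-- Dict lookups in the three non-special regimes return none
theorem pv_get_rx (lm m : Int) (h18 : ¬(lm = 18 ∧ m = 4)) (h26 : ¬(lm = 26 ∧ m = 8)) :
    PySem.Dict.get? pvSpecialTable ("rx", lm, m) = none := by
  simp [pvSpecialTable, PySem.Dict.get?_mk_cons, Prod.ext_iff]
  rw [if_neg (by omega), if_neg (by omega)]; rfl

theorem pv_get_tx (lm m : Int) (h17 : ¬(lm = 17 ∧ m = 4)) :
    PySem.Dict.get? pvSpecialTable ("tx", lm, m) = none := by
  simp [pvSpecialTable, PySem.Dict.get?_mk_cons, Prod.ext_iff]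
  rw [if_neg (by omega)]; rfl

theorem pv_get_other (d : String) (hrx : d ≠ "rx") (htx : d ≠ "tx") (lm m : Int) :
    PySem.Dict.get? pvSpecialTable (d, lm, m) = none := by
  simp [pvSpecialTable, PySem.Dict.get?_mk_cons, Prod.ext_iff]
  rw [if_neg (fun h => hrx h.1.symm), if_neg (fun h => hrx h.1.symm),
      if_neg (fun h => htx h.1.symm)]; rfl

-- the two ports agree in the generic (non-table) regime, for either side
theorem pv_generic (side : String) (hs : side = "rx" ∨ side = "tx") (m : Int) :
    (if m ≥ 8 then
      "<&ad9081_" ++ side ++ "_fddc_chan0 0>, <&ad9081_" ++ side ++ "_fddc_chan0 1>, " ++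
      "<&ad9081_" ++ side ++ "_fddc_chan1 0>, <&ad9081_" ++ side ++ "_fddc_chan1 1>, " ++
      "<&ad9081_" ++ side ++ "_fddc_chan2 0>, <&ad9081_" ++ side ++ "_fddc_chan2 1>, " ++
      "<&ad9081_" ++ side ++ "_fddc_chan3 0>, <&ad9081_" ++ side ++ "_fddc_chan3 1>"
    else
      PySem.Str.join ", " ((PySem.List.pyRange 0 (max 1 (min m 8)) 1).map
        (fun i => "<&ad9081_" ++ side ++ "_fddc_chan" ++ PySem.Int.toStr i ++ " 0>")))
    = PySem.Str.join ", "
        ((if m ≥ 8 then (PySem.List.pyRange 0 4 1).flatMap (fun c => ["0", "1"].map (fun p => (c, p)))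
          else (PySem.List.pyRange 0 (max 1 (min m 8)) 1).map (fun i => (i, "0"))).map (pvFmtPair side)) := by
  by_cases h8 : m ≥ 8
  · rw [if_pos h8, if_pos h8]
    rcases hs with h | h <;> subst h <;> decide
  · rw [if_neg h8, if_neg h8, List.map_map]
    congr 1
    exact List.map_congr_left fun i _ => by simp [Function.comp, pvFmtPair, String.append_assoc]

theorem pv_main : ∀ (direction : String) (m : Int) (link_mode : Int),
    ad9081_converter_select direction m link_mode = ad9081_converter_select_alt direction m link_mode := by
  intro d m lm
  unfold ad9081_converter_select ad9081_converter_select_alt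
  by_cases hrx : d = "rx"
  · subst hrx
    by_cases h18 : lm = 18 ∧ m = 4
    · obtain ⟨h1, h2⟩ := h18; subst h1; subst h2; decide
    · by_cases h26 : lm = 26 ∧ m = 8
      · obtain ⟨h1, h2⟩ := h26; subst h1; subst h2; decide
      · rw [if_neg (fun h => h18 ⟨h.2.1, h.2.2⟩), if_neg (fun h => h26 ⟨h.2.1, h.2.2⟩),
            if_neg (fun h => absurd h.1 (by decide)), pv_get_rx lm m h18 h26]
        exact pv_generic "rx" (Or.inl rfl) m
  · rw [if_neg hrx, if_neg (fun h => hrx h.1), if_neg (fun h => hrx h.1)]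
    by_cases htx : d = "tx"
    · subst htx
      by_cases h17 : lm = 17 ∧ m = 4
      · obtain ⟨h1, h2⟩ := h17; subst h1; subst h2; decide
      · rw [if_neg (fun h => h17 ⟨h.2.1, h.2.2⟩), pv_get_tx lm m h17]
        exact pv_generic "tx" (Or.inr rfl) m
    · rw [if_neg (fun h => htx h.1), pv_get_other d hrx htx lm m]
      exact pv_generic "tx" (Or.inr rfl) m

-- ===== VERDICT (by name: the statement is the Claim_ definition above) =====
theorem ad9081_converter_select_spec : Claim_equal_ad9081_converter_select := by
  intro d m lm _
  unfold Spec_ad9081_converter_select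
  exact pv_main d m lm
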